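-- pv_equiv track=rewrite | github.com/yczeng/induction-sandbox | scripts/findGivenLen.py | makeStrings
-- ===== SOURCE A (Python) =====
-- def makeStrings(utterance):
--     newString = ""
--
--     for count, letter in enumerate(utterance):
--         if count == 0:
--             newString += letter
--         else:
--             if (utterance[count] == "'" or utterance[count].isalpha()) and utterance[count-1] == "[":
--                 newString += '"' + utterance[count]
--             elif utterance[count] == "]" and utterance[count - 1].isalpha():
--                 newString +=  '"' + utterance[count]
--             else:
--                 newString += utterance[count]
--     return newString
-- ===== SOURCE B (Python) =====
-- def makeStrings(utterance):
--     # pass 1: insert '"' right after a '[' whose next char is a quote or alphabetic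
--     out1 = []
--     prev_open = False
--     for c in utterance:
--         if prev_open and (c == "'" or c.isalpha()):
--             out1.append('"')
--         out1.append(c)
--         prev_open = (c == "[")
--     # pass 2: insert '"' right before a ']' preceded by an alphabetic char
--     out2 = []
--     prev_alpha = False
--     for c in out1:
--         if c == "]" and prev_alpha:
--             out2.append('"')
--         out2.append(c)
--         prev_alpha = c.isalpha()
--     return "".join(out2)
-- ===== Notes on version B (the rewrite author's own statement) =====
-- stated objective: simpler
-- what changed: Replaced A's single fused loop over enumerate with utterance[count]/utterance[count-1] index arithmetic by two independent structural passes: one inserting a quote after an opening bracket before an alpha/quote char, then one inserting a quote before a closing bracket after an alpha char; output built with list append + join instead of repeated string concatenation.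
import Mathlib
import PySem

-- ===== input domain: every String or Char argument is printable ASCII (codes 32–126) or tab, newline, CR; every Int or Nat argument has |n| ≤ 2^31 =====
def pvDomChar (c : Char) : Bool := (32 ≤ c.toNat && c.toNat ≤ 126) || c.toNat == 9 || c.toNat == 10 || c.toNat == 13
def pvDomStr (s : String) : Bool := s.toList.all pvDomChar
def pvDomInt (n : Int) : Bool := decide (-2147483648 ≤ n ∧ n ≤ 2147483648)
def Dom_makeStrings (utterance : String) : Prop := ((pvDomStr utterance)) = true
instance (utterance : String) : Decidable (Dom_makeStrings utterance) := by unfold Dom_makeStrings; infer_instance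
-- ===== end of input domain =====

-- B replaces A's single index-based enumerate loop by two independent structural passes
-- (quote after the opening bracket, then quote before the closing one), built by list append + join;
-- objective: simpler (no index arithmetic); a timing run measured B faster by a constant factor.

-- ===== PORT A =====
-- A's loop body: one fused pass over enumerate(utterance), re-indexing utterance[count] / utterance[count-1]
def makeStringsStep (cs : List Char) (news : List Char) (p : Int × Char) : List Char :=
  if p.1 = 0 then news ++ [p.2]
  else
    let cur := PySem.List.pyGetD cs p.1 ' '
    let prev := PySem.List.pyGetD cs (p.1 - 1) ' '
    if (cur == '\'' || PySem.Chars.isalpha cur) && prev == '[' then news ++ ['"', cur]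
    else if cur == ']' && PySem.Chars.isalpha prev then news ++ ['"', cur]
    else news ++ [cur]

def makeStrings (utterance : String) : String :=
  let cs := utterance.toList
  String.ofList ((PySem.List.enumerate cs 0).foldl (makeStringsStep cs) [])

-- ===== PORT B =====
-- pass 1: insert '"' right after a '[' whose next char is a quote or alphabetic
def makeStringsPass1 : Bool → List Char → List Char
  | _, [] => []
  | p, c :: r =>
      (if p && (c == '\'' || PySem.Chars.isalpha c) then ['"'] else []) ++ c :: makeStringsPass1 (c == '[') r

-- pass 2: insert '"' right before a ']' preceded by an alphabetic char
def makeStringsPass2 : Bool → List Char → List Char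
  | _, [] => []
  | a, c :: r =>
      (if c == ']' && a then ['"'] else []) ++ c :: makeStringsPass2 (PySem.Chars.isalpha c) r

def makeStrings_alt (utterance : String) : String :=
  String.ofList (makeStringsPass2 false (makeStringsPass1 false utterance.toList))

-- ===== PRECONDITION & SPEC =====
def Spec_makeStrings (utterance : String) (out : String) : Prop := out = makeStrings_alt utterance
instance (utterance : String) (out : String) : Decidable (Spec_makeStrings utterance out) := by unfold Spec_makeStrings; infer_instance

-- ===== CLAIM (what is proved, stated in full; the proofs are below) =====
def Claim_equal_makeStrings : Prop := ∀ (utterance : String), Dom_makeStrings utterance → Spec_makeStrings utterance (makeStrings utterance)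

-- ===== LEMMAS AND PROOFS =====

-- reference one-pass recursion carrying the previous character (bridge between the two ports)
def makeStringsOne (prev : Char) : List Char → List Char
  | [] => []
  | c :: r =>
      (if (c == '\'' || PySem.Chars.isalpha c) && prev == '[' then ['"', c]
       else if c == ']' && PySem.Chars.isalpha prev then ['"', c]
       else [c]) ++ makeStringsOne c r

-- A's fold from index i ≥ 1 onward is the reference recursion started at the previous character
theorem makeStrings_foldl_eq (cs : List Char) :
    ∀ (t : List Char) (i : Nat) (acc : List Char), 1 ≤ i → cs.drop i = t →
      (PySem.List.enumerate t (i : Int)).foldl (makeStringsStep cs) acc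
        = acc ++ makeStringsOne (cs.getD (i - 1) ' ') t := by
  intro t
  induction t with
  | nil => intro i acc _ _; simp [PySem.List.enumerate_nil, makeStringsOne]
  | cons c r ih =>
    intro i acc hi hdrop
    have hget : cs[i]? = some c := by
      have h0 : (cs.drop i)[0]? = cs[i + 0]? := List.getElem?_drop
      rw [hdrop] at h0
      simpa using h0.symm
    have hcur : PySem.List.pyGetD cs (i : Int) ' ' = c := by
      simp [PySem.List.pyGetD_natCast, List.getD, hget]
    have hcast : ((i : Int)) - 1 = ((i - 1 : Nat) : Int) := by omega
    have hprev : PySem.List.pyGetD cs ((i : Int) - 1) ' ' = cs.getD (i - 1) ' ' := by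
      rw [hcast, PySem.List.pyGetD_natCast]
    have hdrop' : cs.drop (i + 1) = r := by
      rw [← List.drop_drop, hdrop]; rfl
    have hne : (i : Int) ≠ 0 := by omega
    rw [PySem.List.enumerate_cons, List.foldl_cons]
    have hIH := ih (i + 1) (makeStringsStep cs acc ((i : Int), c)) (by omega) hdrop'
    have hc1 : ((i : Int) + 1) = (((i + 1 : Nat)) : Int) := by omega
    rw [hc1] at *
    rw [hIH]
    have hgetd : cs.getD (i + 1 - 1) ' ' = c := by
      simp [List.getD, hget]
    rw [hgetd]
    simp only [makeStringsStep, hne, hcur, hprev]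
    rw [makeStringsOne]
    split_ifs <;> simp_all

-- B's two passes compose to the same reference recursion
theorem makeStrings_pass_eq (t : List Char) :
    ∀ prev : Char,
      makeStringsPass2 (PySem.Chars.isalpha prev) (makeStringsPass1 (prev == '[') t)
        = makeStringsOne prev t := by
  induction t with
  | nil => intro prev; rfl
  | cons c r ih =>
    intro prev
    rw [makeStringsPass1, makeStringsOne]
    by_cases h1 : ((prev == '[') && (c == '\'' || PySem.Chars.isalpha c)) = true
    · have htrig : ((c == '\'' || PySem.Chars.isalpha c) && (prev == '[')) = true := by
        rw [Bool.and_comm]; exact h1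
      have h2 : (c == '\'' || PySem.Chars.isalpha c) = true := (Bool.and_eq_true _ _ |>.mp h1).2
      have hc : (c == ']') = false := by
        by_cases h : c = ']'
        · subst h; exact absurd h2 (by decide)
        · simp [h]
      rw [if_pos h1, if_pos htrig]
      simp only [List.cons_append, List.nil_append]
      rw [makeStringsPass2, makeStringsPass2]
      simp [hc, show PySem.Chars.isalpha '"' = false from by decide,
            show ('"' == ']') = false from by decide, ih c]
    · have htrig : ¬ (((c == '\'' || PySem.Chars.isalpha c) && (prev == '[')) = true) := by
        rw [Bool.and_comm]; simp_all
      rw [if_neg h1, if_neg htrig]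
      simp only [List.nil_append]
      rw [makeStringsPass2]
      by_cases h2 : ((c == ']') && PySem.Chars.isalpha prev) = true <;> simp [h2, ih c]

-- ===== VERDICT (by name: the statement is the Claim_ definition above) =====
theorem makeStrings_list_eq (cs : List Char) :
    (PySem.List.enumerate cs 0).foldl (makeStringsStep cs) []
      = makeStringsPass2 false (makeStringsPass1 false cs) := by
  cases cs with
  | nil => rfl
  | cons c0 rest =>
    rw [PySem.List.enumerate_cons, List.foldl_cons]
    have hstep : makeStringsStep (c0 :: rest) [] ((0 : Int), c0) = [c0] := rfl
    rw [hstep]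
    have e : (0 : Int) + 1 = ((1 : Nat) : Int) := by norm_num
    rw [e, makeStrings_foldl_eq (c0 :: rest) rest 1 [c0] (le_refl 1) rfl]
    have hgetd : (c0 :: rest).getD (1 - 1) ' ' = c0 := rfl
    rw [hgetd]
    simp [makeStringsPass1, makeStringsPass2, makeStrings_pass_eq rest c0]

theorem makeStrings_spec : Claim_equal_makeStrings := by
  intro u _
  unfold Spec_makeStrings makeStrings makeStrings_alt
  exact congrArg String.ofList (makeStrings_list_eq u.toList)
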